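-- pv_equiv track=rewrite | github.com/HsinPu/mini-bot | src/opensprite/utils/log_redaction.py | _redact_query_string
-- ===== SOURCE A (Python) =====
-- _SENSITIVE_QUERY_PARAMS = frozenset(
--     {
--         "access_token",
--         "refresh_token",
--         "id_token",
--         "token",
--         "api_key",
--         "apikey",
--         "client_secret",
--         "password",
--         "auth",
--         "jwt",
--         "session",
--         "secret",
--         "key",
--         "code",
--         "signature",
--         "x-amz-signature",
--     }
-- )
--
-- def _redact_query_string(query: str) -> str:
--     parts = []
--     for pair in query.split("&"):
--         if "=" not in pair:
--             parts.append(pair)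
--             continue
--         key, _, value = pair.partition("=")
--         parts.append(f"{key}=***" if key.lower() in _SENSITIVE_QUERY_PARAMS else pair)
--     return "&".join(parts)
-- ===== SOURCE B (Python) =====
-- _SENSITIVE_QUERY_PARAMS = frozenset(
--     {
--         "access_token",
--         "refresh_token",
--         "id_token",
--         "token",
--         "api_key",
--         "apikey",
--         "client_secret",
--         "password",
--         "auth",
--         "jwt",
--         "session",
--         "secret",
--         "key",
--         "code",
--         "signature",
--         "x-amz-signature",
--     }
-- )
--
--
-- def _redact_query_string(query: str) -> str:
--     # Single streaming pass over the characters: read a key up to '=' or '&',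
--     # then either redact or copy the value through; no split/partition/join.
--     out = []
--     rest = query
--     while True:
--         k = 0
--         while k < len(rest) and rest[k] not in "&=":
--             k += 1
--         key = rest[:k]
--         if k < len(rest) and rest[k] == "=":
--             v_end = k + 1
--             while v_end < len(rest) and rest[v_end] != "&":
--                 v_end += 1
--             if key.lower() in _SENSITIVE_QUERY_PARAMS:
--                 out.append(key + "=***")
--             else:
--                 out.append(rest[:v_end])
--             rest = rest[v_end:]
--         else:
--             out.append(key)
--             rest = rest[k:]
--         if not rest:
--             break
--         out.append("&")
--         rest = rest[1:]
--     return "".join(out)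
-- ===== Notes on version B (the rewrite author's own statement) =====
-- stated objective: alternative
-- what changed: Replaces split-on-'&' / per-pair partition / join with a single streaming character scan that reads each key up to '=' or '&' and then copies or redacts the value in place, never materialising the list of pairs.
import Mathlib
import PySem

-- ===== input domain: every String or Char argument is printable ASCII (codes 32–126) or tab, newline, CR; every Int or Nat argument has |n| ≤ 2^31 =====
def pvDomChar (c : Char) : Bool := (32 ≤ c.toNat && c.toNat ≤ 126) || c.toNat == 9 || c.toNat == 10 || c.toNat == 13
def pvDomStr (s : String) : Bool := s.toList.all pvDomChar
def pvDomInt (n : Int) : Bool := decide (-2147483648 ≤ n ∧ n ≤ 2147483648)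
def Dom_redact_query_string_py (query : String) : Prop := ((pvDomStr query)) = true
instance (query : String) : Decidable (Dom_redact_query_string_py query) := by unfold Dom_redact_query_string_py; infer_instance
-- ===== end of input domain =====

-- B replaces A's split/partition/join over '&'-pairs by one streaming character scan; objective: alternative (same cost, different algorithm).

-- ===== PORT A =====
-- module constant _SENSITIVE_QUERY_PARAMS (a frozenset of strings)
def sensitiveParams : PySem.Set String := PySem.Set.ofList
  ["access_token", "refresh_token", "id_token", "token", "api_key", "apikey",
   "client_secret", "password", "auth", "jwt", "session", "secret", "key",
   "code", "signature", "x-amz-signature"]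

def redact_query_string_py (query : String) : String :=
  let parts := (PySem.Chars.splitOn query.toList "&".toList).foldl
    (fun parts pair =>
      if PySem.Chars.isIn "=".toList pair = false then
        parts ++ [pair]
      else
        -- hand port of pair.partition("="): key = chars before the FIRST '='
        -- (exact here: the branch guarantees '=' ∈ pair; the value part is unused)
        let key := pair.takeWhile (fun c => c ≠ '=')
        parts ++ [if PySem.Set.contains sensitiveParams (String.mk (PySem.Chars.lower key))
                  then key ++ "=***".toList else pair])
    []
  String.mk (PySem.Chars.join "&".toList parts)

-- ===== PORT B =====
-- one step of the streaming scan: render the first '&'-segment, return it with the remainder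
def altStep (cs : List Char) : List Char × List Char :=
  let key := cs.takeWhile (fun c => ¬ (c = '&' ∨ c = '='))
  let rest := cs.dropWhile (fun c => ¬ (c = '&' ∨ c = '='))
  match rest with
  | c :: rest' =>
    if c = '=' then
      let value := rest'.takeWhile (fun c => c ≠ '&')
      let tailr := rest'.dropWhile (fun c => c ≠ '&')
      ((if PySem.Set.contains sensitiveParams (String.mk (PySem.Chars.lower key))
        then key ++ "=***".toList else key ++ '=' :: value), tailr)
    else (key, rest)
  | [] => (key, [])

theorem altStep_snd_le (cs : List Char) : (altStep cs).2.length ≤ cs.length := by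
  unfold altStep
  have h1 := List.length_dropWhile_le (fun c : Char => ¬ (c = '&' ∨ c = '=')) cs
  cases hd : cs.dropWhile (fun c : Char => ¬ (c = '&' ∨ c = '=')) with
  | nil => simp
  | cons c rest' =>
    simp only []
    split
    · have h2 := List.length_dropWhile_le (fun c : Char => c ≠ '&') rest'
      simp only [hd, List.length_cons] at h1
      dsimp only
      omega
    · rw [hd] at h1; simpa using h1

def altGo (cs : List Char) : List Char :=
  match h : altStep cs with
  | (seg, []) => seg
  | (seg, _ :: rest') => seg ++ '&' :: altGo rest'
termination_by cs.length
decreasing_by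
  have := altStep_snd_le cs
  rw [h] at this
  simp at this
  omega

def redact_query_string_py_alt (query : String) : String :=
  String.mk (altGo query.toList)

-- ===== PRECONDITION & SPEC =====
def Spec_redact_query_string_py (query : String) (out : String) : Prop := out = redact_query_string_py_alt query
instance (query : String) (out : String) : Decidable (Spec_redact_query_string_py query out) := by unfold Spec_redact_query_string_py; infer_instance

-- ===== CLAIM (what is proved, stated in full; the proofs are below) =====
def Claim_equal_redact_query_string_py : Prop := ∀ (query : String), Dom_redact_query_string_py query → Spec_redact_query_string_py query (redact_query_string_py query)

-- ===== LEMMAS AND PROOFS =====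

-- per-pair rendering function of A (what the fold appends for each pair)
def gA (pair : List Char) : List Char :=
  if PySem.Chars.isIn "=".toList pair = false then pair
  else
    let key := pair.takeWhile (fun c => c ≠ '=')
    if PySem.Set.contains sensitiveParams (String.mk (PySem.Chars.lower key))
    then key ++ "=***".toList else pair

-- structural characterisation of splitting on a single character
def splitC (d : Char) : List Char → List (List Char)
  | [] => [[]]
  | c :: cs =>
    if c = d then [] :: splitC d cs
    else
      match splitC d cs with
      | p :: ps => (c :: p) :: ps
      | [] => [[c]]

theorem splitC_ne_nil (d : Char) (cs : List Char) : splitC d cs ≠ [] := by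
  cases cs with
  | nil => simp [splitC]
  | cons c cs =>
    simp only [splitC]
    split
    · simp
    · split <;> simp_all

-- prepend to the head of a nonempty list of pieces
def consHead (pre : List Char) : List (List Char) → List (List Char)
  | [] => [pre]
  | p :: ps => (pre ++ p) :: ps

theorem splitOn_go_eq (d : Char) (fuel : Nat) (l cur : List Char) (acc : List (List Char))
    (h : l.length < fuel) :
    PySem.Chars.splitOn.go [d] fuel l cur acc = acc.reverse ++ consHead cur.reverse (splitC d l) := by
  induction fuel generalizing l cur acc with
  | zero => omega
  | succ fuel ih =>
    cases l with
    | nil => simp [PySem.Chars.splitOn.go, splitC, consHead]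
    | cons c rest =>
      simp only [PySem.Chars.splitOn.go]
      by_cases hc : c = d
      · subst hc
        have hpre : List.isPrefixOf [c] (c :: rest) = true := by simp [List.isPrefixOf]
        rw [if_pos hpre]
        have hdrop : List.drop [c].length (c :: rest) = rest := rfl
        rw [hdrop]
        simp only [List.length_cons] at h
        rw [ih rest [] (cur.reverse :: acc) (by omega)]
        rcases hs : splitC c rest with _ | ⟨p, ps⟩
        · exact absurd hs (splitC_ne_nil c rest)
        · simp [splitC, consHead, hs]
      · have hpre : List.isPrefixOf [d] (c :: rest) = false := by
          simp [List.isPrefixOf]; exact fun hh => absurd hh.symm hc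
        rw [if_neg (by simp [hpre])]
        simp only [List.length_cons] at h
        rw [ih rest (c :: cur) acc (by omega)]
        rcases hs : splitC d rest with _ | ⟨p, ps⟩
        · exact absurd hs (splitC_ne_nil d rest)
        · simp [splitC, consHead, hs, hc]

theorem splitOn_eq_splitC (d : Char) (cs : List Char) :
    PySem.Chars.splitOn cs [d] = splitC d cs := by
  unfold PySem.Chars.splitOn
  rw [splitOn_go_eq d (cs.length + 1) cs [] [] (by omega)]
  rcases hs : splitC d cs with _ | ⟨p, ps⟩
  · exact absurd hs (splitC_ne_nil d cs)
  · simp [consHead]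

theorem foldl_append_map (l : List (List Char)) (acc : List (List Char)) :
    l.foldl (fun parts pair =>
      if PySem.Chars.isIn "=".toList pair = false then parts ++ [pair]
      else
        let key := pair.takeWhile (fun c => c ≠ '=')
        parts ++ [if PySem.Set.contains sensitiveParams (String.mk (PySem.Chars.lower key))
                  then key ++ "=***".toList else pair]) acc
    = acc ++ l.map gA := by
  induction l generalizing acc with
  | nil => simp
  | cons p l ih =>
    simp only [List.foldl_cons, List.map_cons, ih, gA]
    split <;> simp

-- A's result as join of the mapped split
theorem A_eq (query : String) :
    redact_query_string_py query =
      String.mk (PySem.Chars.join ['&'] ((splitC '&' query.toList).map gA)) := by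
  unfold redact_query_string_py
  rw [show ("&".toList) = ['&'] from rfl, splitOn_eq_splitC, foldl_append_map]
  simp

theorem singleton_infix_iff_mem (a : Char) (l : List Char) : [a] <:+: l ↔ a ∈ l := by
  constructor
  · intro h; exact h.sublist.mem (by simp)
  · intro h
    obtain ⟨s, t, rfl⟩ := List.append_of_mem h
    exact ⟨s, t, by simp⟩

theorem isIn_eq_singleton (a : Char) (l : List Char) :
    PySem.Chars.isIn [a] l = l.contains a := by
  by_cases h : a ∈ l
  · rw [(PySem.Chars.isIn_iff_infix [a] l).2 ((singleton_infix_iff_mem a l).2 h)]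
    simp [h]
  · rw [(PySem.Chars.isIn_eq_false_iff [a] l).2 (fun hh => h ((singleton_infix_iff_mem a l).1 hh))]
    simp [h]

-- takeWhile/dropWhile across a prefix all of whose elements satisfy the predicate
theorem takeWhile_append_all {p : Char → Bool} (xs ys : List Char) (h : ∀ x ∈ xs, p x) :
    (xs ++ ys).takeWhile p = xs ++ ys.takeWhile p := by
  induction xs with
  | nil => simp
  | cons x xs ih =>
    simp only [List.cons_append, List.takeWhile_cons, h x (by simp)]
    simp [ih (fun x hx => h x (by simp [hx]))]

theorem dropWhile_append_all {p : Char → Bool} (xs ys : List Char) (h : ∀ x ∈ xs, p x) :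
    (xs ++ ys).dropWhile p = ys.dropWhile p := by
  induction xs with
  | nil => simp
  | cons x xs ih =>
    simp only [List.cons_append, List.dropWhile_cons, h x (by simp)]
    simp [ih (fun x hx => h x (by simp [hx]))]

theorem dropWhile_head_false {p : Char → Bool} {l xs : List Char} {x : Char}
    (h : l.dropWhile p = x :: xs) : p x = false := by
  induction l with
  | nil => simp at h
  | cons a l ih =>
    rw [List.dropWhile_cons] at h
    by_cases hp : p a = true
    · exact ih (by simpa [hp] using h)
    · simp only [hp] at h
      cases h
      simpa using hp

theorem altGo_of_nil {cs seg : List Char} (h : altStep cs = (seg, [])) : altGo cs = seg := by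
  unfold altGo
  split
  · next h' => rw [h] at h'; injection h' with h1 _; exact h1.symm
  · next h' => rw [h] at h'; injection h' with _ h2; cases h2

theorem altGo_of_cons {cs seg rest' : List Char} {c : Char}
    (h : altStep cs = (seg, c :: rest')) : altGo cs = seg ++ '&' :: altGo rest' := by
  rw [altGo.eq_def]
  split
  · next h' => rw [h] at h'; injection h' with _ h2; cases h2
  · next h' =>
      rw [h] at h'
      injection h' with h1 h2
      injection h2 with _ h3
      rw [h1, h3]

theorem splitC_of_dropWhile_nil {d : Char} {cs : List Char}
    (h : cs.dropWhile (fun c => c ≠ d) = []) :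
    splitC d cs = [cs.takeWhile (fun c => c ≠ d)] := by
  induction cs with
  | nil => simp [splitC]
  | cons a cs ih =>
    rw [List.dropWhile_cons] at h
    by_cases ha : a = d
    · simp [ha] at h
    · simp only [ne_eq, ha, not_false_eq_true, decide_true, if_pos] at h
      rw [List.takeWhile_cons_of_pos (by simpa using ha)]
      simp [splitC, ha, ih h]

theorem splitC_of_dropWhile_cons {d c : Char} {cs r : List Char}
    (h : cs.dropWhile (fun c => c ≠ d) = c :: r) :
    splitC d cs = cs.takeWhile (fun c => c ≠ d) :: splitC d r := by
  induction cs with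
  | nil => simp at h
  | cons a cs ih =>
    rw [List.dropWhile_cons] at h
    by_cases ha : a = d
    · simp only [ne_eq, ha, not_true_eq_false, decide_false, if_neg, Bool.false_eq_true,
        not_false_eq_true] at h
      cases h
      rw [List.takeWhile_cons_of_neg (by simp [ha])]
      simp [splitC, ha]
    · simp only [ne_eq, ha, not_false_eq_true, decide_true, if_pos] at h
      rw [List.takeWhile_cons_of_pos (by simpa using ha)]
      have hrec := ih h
      simp [splitC, ha, hrec]

theorem gA_of_no_eq {t : List Char} (h : '=' ∉ t) : gA t = t := by
  unfold gA
  rw [show ("=".toList : List Char) = ['='] from rfl, isIn_eq_singleton]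
  simp [h]

-- B's step computes A's per-pair value on the first '&'-segment and leaves the rest
theorem altStep_eq (cs : List Char) :
    altStep cs = (gA (cs.takeWhile (fun c => c ≠ '&')), cs.dropWhile (fun c => c ≠ '&')) := by
  set t := cs.takeWhile (fun c => c ≠ '&') with ht
  set d := cs.dropWhile (fun c => c ≠ '&') with hd0
  have hcs : t ++ d = cs := List.takeWhile_append_dropWhile
  have htne : ∀ x ∈ t, x ≠ '&' := by
    intro x hx
    have h := List.mem_takeWhile_imp (ht ▸ hx)
    exact of_decide_eq_true h
  have hdhead : ∀ b r, d = b :: r → b = '&' := by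
    intro b r hb
    have := dropWhile_head_false (hd0 ▸ hb)
    simpa using this
  by_cases hmem : '=' ∈ t
  · -- the first segment contains '=': B reads key, '=', value
    set k := t.takeWhile (fun c => c ≠ '=') with hk
    have hdropne : t.dropWhile (fun c => c ≠ '=') ≠ [] := by
      intro hnil
      exact absurd ((List.dropWhile_eq_nil_iff ..).1 hnil '=' hmem) (by simp)
    rcases hv : t.dropWhile (fun c => c ≠ '=') with _ | ⟨e, v⟩
    · exact absurd hv hdropne
    have he : e = '=' := by have := dropWhile_head_false hv; simpa using this
    subst he
    have hts : t = k ++ '=' :: v := by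
      rw [hk, ← hv]
      exact (List.takeWhile_append_dropWhile).symm
    have hkmem : ∀ x ∈ k, x ∈ t := fun x hx => (List.takeWhile_sublist _).mem (hk ▸ hx)
    have hvmem : ∀ x ∈ v, x ∈ t := by
      intro x hx; rw [hts]; simp [hx]
    have hcs2 : cs = k ++ '=' :: (v ++ d) := by
      conv_lhs => rw [← hcs, hts]
      simp
    have hkall : ∀ x ∈ k, decide (¬ (x = '&' ∨ x = '=')) = true := by
      intro x hx
      have h1 := htne x (hkmem x hx)
      have h2 : x ≠ '=' := by
        have h := List.mem_takeWhile_imp (hk ▸ hx)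
        exact of_decide_eq_true h
      simp [h1, h2]
    have hkey : cs.takeWhile (fun c => ¬ (c = '&' ∨ c = '=')) = k := by
      conv_lhs => rw [hcs2]
      rw [takeWhile_append_all _ _ hkall]
      simp
    have hrest : cs.dropWhile (fun c => ¬ (c = '&' ∨ c = '=')) = '=' :: (v ++ d) := by
      conv_lhs => rw [hcs2]
      rw [dropWhile_append_all _ _ hkall]
      simp
    have hvall : ∀ x ∈ v, decide (x ≠ '&') = true := by
      intro x hx; simpa using htne x (hvmem x hx)
    have hvalue : (v ++ d).takeWhile (fun c => c ≠ '&') = v := by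
      rw [takeWhile_append_all _ _ hvall]
      rcases hd : d with _ | ⟨b, r⟩
      · simp
      · rw [hdhead b r hd]; simp
    have htail : (v ++ d).dropWhile (fun c => c ≠ '&') = d := by
      rw [dropWhile_append_all _ _ hvall]
      rcases hd : d with _ | ⟨b, r⟩
      · simp
      · rw [hdhead b r hd]; simp
    have hisin : PySem.Chars.isIn "=".toList t = true := by
      rw [show ("=".toList : List Char) = ['='] from rfl, isIn_eq_singleton]
      simp [hmem]
    unfold altStep
    simp only [hkey, hrest]
    rw [if_pos trivial]
    simp only [hvalue, htail]
    unfold gA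
    rw [hisin]
    rw [if_neg (show ¬ (true = false) by decide)]
    rw [← hk]
    dsimp only
    split_ifs with hsens
    · rfl
    · simp [hts]
  · -- no '=' in the first segment: B's key is the whole segment
    have hkall : ∀ x ∈ t, decide (¬ (x = '&' ∨ x = '=')) = true := by
      intro x hx
      have h1 := htne x hx
      have h2 : x ≠ '=' := fun hh => hmem (hh ▸ hx)
      simp [h1, h2]
    have hkey : cs.takeWhile (fun c => ¬ (c = '&' ∨ c = '='))
        = t ++ d.takeWhile (fun c => ¬ (c = '&' ∨ c = '=')) := by
      conv_lhs => rw [← hcs]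
      rw [takeWhile_append_all _ _ hkall]
    have hrest : cs.dropWhile (fun c => ¬ (c = '&' ∨ c = '='))
        = d.dropWhile (fun c => ¬ (c = '&' ∨ c = '=')) := by
      conv_lhs => rw [← hcs]
      rw [dropWhile_append_all _ _ hkall]
    rw [gA_of_no_eq hmem]
    rcases hd : d with _ | ⟨b, r⟩
    · unfold altStep
      simp only [hkey, hrest, hd]
      simp
    · have hb := hdhead b r hd
      subst hb
      unfold altStep
      simp only [hkey, hrest, hd]
      simp

theorem altGo_eq_aux : ∀ (n : Nat) (cs : List Char), cs.length ≤ n →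
    altGo cs = PySem.Chars.join ['&'] ((splitC '&' cs).map gA) := by
  intro n
  induction n with
  | zero =>
    intro cs hl
    have hnil : cs = [] := List.eq_nil_of_length_eq_zero (by omega)
    subst hnil
    rw [altGo_of_nil (by rw [altStep_eq]; rfl)]
    simp [splitC, PySem.Chars.join_singleton]
  | succ n ih =>
    intro cs hl
    have hstep := altStep_eq cs
    rcases hd : cs.dropWhile (fun c => c ≠ '&') with _ | ⟨b, r⟩
    · rw [hd] at hstep
      rw [altGo_of_nil hstep, splitC_of_dropWhile_nil hd]
      simp [PySem.Chars.join_singleton]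
    · have hb : b = '&' := by have := dropWhile_head_false hd; simpa using this
      subst hb
      rw [hd] at hstep
      rw [altGo_of_cons hstep]
      have hlen : r.length ≤ n := by
        have h1 := congrArg List.length
          (List.takeWhile_append_dropWhile (p := fun c => c ≠ '&') (l := cs))
        rw [hd] at h1
        simp only [List.length_append, List.length_cons] at h1
        omega
      rw [ih r hlen, splitC_of_dropWhile_cons hd]
      rcases hsp : splitC '&' r with _ | ⟨p, ps⟩
      · exact absurd hsp (splitC_ne_nil _ _)
      · simp [PySem.Chars.join_cons_cons]

-- the core equality: B's streaming scan equals join of A's per-pair map over the split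
theorem altGo_eq (cs : List Char) :
    altGo cs = PySem.Chars.join ['&'] ((splitC '&' cs).map gA) :=
  altGo_eq_aux cs.length cs le_rfl

theorem redact_query_string_py_spec : Claim_equal_redact_query_string_py := by
  intro query _
  unfold Spec_redact_query_string_py redact_query_string_py_alt
  rw [A_eq, altGo_eq]
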